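-- pv_equiv track=rewrite | github.com/111geon/problemsolving | programmers/타겟넘버.py | stack_adds
-- ===== SOURCE A (Python) =====
-- def stack_adds(numbers):
--     if len(numbers) == 1:
--         return [numbers[0], -numbers[0]]
--     sub_stack = stack_adds(numbers[1:])
--     pos_stack = []
--     neg_stack = []
--     for a in sub_stack:
--         pos_stack.append(a + numbers[0])
--         neg_stack.append(a - numbers[0])
--     return pos_stack + neg_stack
-- ===== SOURCE B (Python) =====
-- def stack_adds(numbers):
--     n = len(numbers)
--     out = []
--     for mask in range(1 << n):
--         s = 0
--         for j, x in enumerate(numbers):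
--             if (mask >> (n - 1 - j)) & 1:
--                 s -= x
--             else:
--                 s += x
--         out.append(s)
--     return out
-- ===== Notes on version B (the rewrite author's own statement) =====
-- stated objective: alternative
-- what changed: B replaces A's recursion (strip the first number, expand each sub-sum into two blocks and concatenate) with a non-recursive closed-form enumeration: for each bitmask in range(2^n) it directly computes the signed sum, bit j of the mask choosing the sign of numbers[j], reproducing A's exact ordering.
import Mathlib
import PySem

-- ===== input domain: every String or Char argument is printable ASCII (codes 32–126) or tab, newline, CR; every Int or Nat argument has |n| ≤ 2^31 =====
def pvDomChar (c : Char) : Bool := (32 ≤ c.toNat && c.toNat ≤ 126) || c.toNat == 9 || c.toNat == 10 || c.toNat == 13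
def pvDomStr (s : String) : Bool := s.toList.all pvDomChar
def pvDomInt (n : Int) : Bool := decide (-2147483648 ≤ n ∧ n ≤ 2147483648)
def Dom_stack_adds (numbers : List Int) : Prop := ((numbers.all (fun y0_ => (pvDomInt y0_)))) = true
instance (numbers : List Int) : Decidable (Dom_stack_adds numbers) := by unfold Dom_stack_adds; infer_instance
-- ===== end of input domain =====

-- B drops A's recursion entirely: it enumerates the 2^n sign masks and computes each signed
-- sum directly (bit j of the mask = sign of numbers[j]), same order and same values as A.
-- On [] the Python A raises RecursionError (excluded by Pre_); B returns [0] there.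

-- ===== PORT A =====
def stack_adds (numbers : List Int) : List Int :=
  match numbers with
  | [] => []    -- unreachable under Pre_ (Python A infinite-recurses on [])
  | [x] => [x, -x]
  | x :: y :: rest =>
    let sub_stack := stack_adds (y :: rest)
    let pn := sub_stack.foldl (fun (st : List Int × List Int) a =>
      (st.1 ++ [a + x], st.2 ++ [a - x])) ([], [])
    pn.1 ++ pn.2

-- ===== PORT B =====
-- inner loop:  s = 0;  for j, x in enumerate(numbers): s -= x if bit else s += x
def pvSignedSum (n : Nat) (mask : Nat) : List Int → Nat → Int → Int
  | [], _, s => s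
  | x :: rest, j, s =>
    pvSignedSum n mask rest (j + 1) (if (mask >>> (n - 1 - j)) % 2 == 1 then s - x else s + x)

-- outer loop:  out = [];  for mask in range(1 << n): out.append(<inner loop>)
def stack_adds_alt (numbers : List Int) : List Int :=
  let n := numbers.length
  (List.range (2 ^ n)).foldl (fun out mask => out ++ [pvSignedSum n mask numbers 0 0]) []

-- ===== PRECONDITION & SPEC =====
-- Pre_ excludes exactly the empty list, on which Python A raises RecursionError.
def Pre_stack_adds (numbers : List Int) : Prop := numbers ≠ []
instance (numbers : List Int) : Decidable (Pre_stack_adds numbers) := by unfold Pre_stack_adds; infer_instance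
def pvWitness_stack_adds : List Int := [1, 2]
def Spec_stack_adds (numbers : List Int) (out : List Int) : Prop := out = stack_adds_alt numbers
instance (numbers : List Int) (out : List Int) : Decidable (Spec_stack_adds numbers out) := by unfold Spec_stack_adds; infer_instance

-- ===== CLAIM (what is proved, stated in full; the proofs are below) =====
def Claim_equal_stack_adds : Prop := ∀ (numbers : List Int), Dom_stack_adds numbers → Pre_stack_adds numbers → Spec_stack_adds numbers (stack_adds numbers)

-- ===== LEMMAS AND PROOFS =====

-- A's loop over sub with two append-accumulators is the pair of maps.
theorem pvA_foldl (x : Int) (L p n : List Int) :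
    L.foldl (fun (st : List Int × List Int) a => (st.1 ++ [a + x], st.2 ++ [a - x])) (p, n)
      = (p ++ L.map (· + x), n ++ L.map (· - x)) := by
  induction L generalizing p n with
  | nil => simp
  | cons a L ih => simp [List.foldl_cons, ih]

theorem pvA_cons (x y : Int) (rest : List Int) :
    stack_adds (x :: y :: rest)
      = (stack_adds (y :: rest)).map (· + x) ++ (stack_adds (y :: rest)).map (· - x) := by
  rw [stack_adds]
  simp [pvA_foldl]

-- B's append-loop over range is the map.
theorem pvB_outer (f : Nat → Int) (L : List Nat) (acc : List Int) :
    L.foldl (fun out mask => out ++ [f mask]) acc = acc ++ L.map f := by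
  induction L generalizing acc with
  | nil => simp
  | cons a L ih => simp [List.foldl_cons, ih]

-- the accumulator of the inner loop only shifts the result
theorem pvSS_shift (n mask : Nat) (l : List Int) (j : Nat) (s : Int) :
    pvSignedSum n mask l j s = s + pvSignedSum n mask l j 0 := by
  induction l generalizing j s with
  | nil => simp [pvSignedSum]
  | cons x rest ih =>
    rw [pvSignedSum, pvSignedSum, ih]
    conv_rhs => rw [ih]
    split <;> ring

-- starting one index later with one more leading bit position is the same sum
theorem pvSS_succ (n mask : Nat) (l : List Int) (j : Nat) (s : Int) :
    pvSignedSum (n + 1) mask l (j + 1) s = pvSignedSum n mask l j s := by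
  induction l generalizing j s with
  | nil => simp [pvSignedSum]
  | cons x rest ih =>
    rw [pvSignedSum, pvSignedSum]
    have : n + 1 - 1 - (j + 1) = n - 1 - j := by omega
    rw [this, ih]

-- adding the bit 2^n does not change any bit below n
theorem pvBit (n k m : Nat) (hk : k < n) :
    ((2 ^ n + m) >>> k) % 2 = (m >>> k) % 2 := by
  rw [Nat.shiftRight_eq_div_pow, Nat.shiftRight_eq_div_pow]
  have h1 : 2 ^ n = 2 ^ k * 2 ^ (n - k) := by
    rw [← pow_add]; congr 1; omega
  rw [h1, Nat.mul_add_div (by positivity)]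
  have h2 : 2 ^ (n - k) = 2 * 2 ^ (n - k - 1) := by
    rw [← pow_succ']; congr 1; omega
  omega


-- the inner sum over positions ≥ 1 does not read bit n, so adding 2^n is invisible
theorem pvSS_high (n m : Nat) (hn : 1 ≤ n) (ys : List Int) :
    ∀ (j : Nat) (s : Int), 1 ≤ j →
      pvSignedSum (n + 1) (2 ^ n + m) ys j s = pvSignedSum (n + 1) m ys j s := by
  induction ys with
  | nil => intro j s _; simp [pvSignedSum]
  | cons x rest ih =>
    intro j s hj
    rw [pvSignedSum, pvSignedSum]
    have hsh : n + 1 - 1 - j = n - j := by omega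
    rw [hsh, pvBit n (n - j) m (by omega), ih (j + 1) _ (by omega)]

-- B on ys as a map over the masks
theorem pvB_map (ys : List Int) :
    stack_adds_alt ys
      = (List.range (2 ^ ys.length)).map (fun m => pvSignedSum ys.length m ys 0 0) := by
  rw [stack_adds_alt, pvB_outer]
  simp

-- B satisfies A's recurrence (for any tail, including [])
theorem pvB_cons (x : Int) (ys : List Int) :
    stack_adds_alt (x :: ys)
      = (stack_adds_alt ys).map (· + x) ++ (stack_adds_alt ys).map (· - x) := by
  rw [pvB_map, pvB_map]
  set n := ys.length with hn
  have hlen : (x :: ys).length = n + 1 := by simp [hn]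
  rw [hlen]
  have hsplit : (2 : Nat) ^ (n + 1) = 2 ^ n + 2 ^ n := by ring
  rw [hsplit, List.range_add, List.map_append, List.map_map, List.map_map, List.map_map]
  refine congrArg₂ (fun u v : List Int => u ++ v) ?_ ?_ <;>
    refine List.map_congr_left ?_ <;> intro m hm <;>
    rw [List.mem_range] at hm
  · -- low masks: bit n is 0, sign +x
    simp only [Function.comp_apply]
    rw [pvSignedSum]
    have h0 : n + 1 - 1 - 0 = n := by omega
    rw [h0]
    have hb : m >>> n % 2 = 0 := by
      rw [Nat.shiftRight_eq_div_pow, Nat.div_eq_of_lt hm]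
    simp only [hb]
    norm_num
    rw [pvSS_shift, pvSS_succ]
    ring
  · -- high masks: bit n is 1, sign -x
    simp only [Function.comp_apply]
    rw [pvSignedSum]
    have h0 : n + 1 - 1 - 0 = n := by omega
    rw [h0]
    have hb : (2 ^ n + m) >>> n % 2 = 1 := by
      rw [Nat.shiftRight_eq_div_pow, Nat.add_comm,
        Nat.add_div_right _ (by positivity), Nat.div_eq_of_lt hm]
    simp only [hb]
    norm_num
    cases ys with
    | nil => simp [pvSignedSum]
    | cons z rest =>
      have hn1 : 1 ≤ n := by rw [hn]; simp
      rw [pvSS_high n m hn1 _ 1 _ (le_refl 1), pvSS_shift, pvSS_succ]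
      ring

theorem pv_main (xs : List Int) (h : xs ≠ []) : stack_adds xs = stack_adds_alt xs := by
  induction xs with
  | nil => exact absurd rfl h
  | cons x ys ih =>
    cases ys with
    | nil =>
        simp [stack_adds, stack_adds_alt, pvSignedSum, List.range_succ]
    | cons y rest =>
      rw [pvA_cons, pvB_cons, ih (by simp)]

-- ===== VERDICT (by name: the statement is the Claim_ definition above) =====
theorem stack_adds_spec : Claim_equal_stack_adds := by
  intro numbers _ hpre
  exact pv_main numbers hpre
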